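-- pv_equiv track=rewrite | github.com/philipwilsonTHG/psh | psh/builtins/io.py | _process_escape_sequence
-- ===== SOURCE A (Python) =====
-- def _process_escape_sequence(format_str: str, start: int) -> tuple:
--     """Process escape sequence starting at backslash. Returns (char, chars_consumed)."""
--     if start + 1 >= len(format_str):
--         return '\\', 1
--
--     next_char = format_str[start + 1]
--
--     # Standard escape sequences
--     escape_map = {
--         'a': '\a',    # Alert (bell)
--         'b': '\b',    # Backspace
--         'f': '\f',    # Form feed
--         'n': '\n',    # Newline
--         'r': '\r',    # Carriage return
--         't': '\t',    # Tab
--         'v': '\v',    # Vertical tab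
--         '\\': '\\',   # Backslash
--         '"': '"',     # Double quote
--         "'": "'",     # Single quote
--     }
--
--     if next_char in escape_map:
--         return escape_map[next_char], 2
--
--     # Octal escape sequence \nnn
--     if next_char.isdigit():
--         octal_str = ''
--         i = start + 1
--         while i < len(format_str) and i < start + 4 and format_str[i].isdigit():
--             octal_str += format_str[i]
--             i += 1
--         try:
--             value = int(octal_str, 8)
--             if value <= 255:
--                 return chr(value), i - start
--         except (ValueError, OverflowError):
--             pass
--
--     # Hex escape sequence \xhh
--     if next_char == 'x' and start + 3 < len(format_str):
--         hex_str = format_str[start + 2:start + 4]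
--         if all(c in '0123456789abcdefABCDEF' for c in hex_str):
--             try:
--                 return chr(int(hex_str, 16)), 4
--             except (ValueError, OverflowError):
--                 pass
--
--     # Unicode escape sequences \uhhhh and \Uhhhhhhhh
--     if next_char == 'u' and start + 6 <= len(format_str):
--         hex_str = format_str[start + 2:start + 6]
--         if all(c in '0123456789abcdefABCDEF' for c in hex_str):
--             try:
--                 return chr(int(hex_str, 16)), 6
--             except (ValueError, OverflowError):
--                 pass
--
--     if next_char == 'U' and start + 10 <= len(format_str):
--         hex_str = format_str[start + 2:start + 10]
--         if all(c in '0123456789abcdefABCDEF' for c in hex_str):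
--             try:
--                 return chr(int(hex_str, 16)), 10
--             except (ValueError, OverflowError):
--                 pass
--
--     # Default: return the character as-is
--     return next_char, 2
-- ===== SOURCE B (Python) =====
-- _KEYS = 'abfnrtv\\"\''
-- _VALS = '\a\b\f\n\r\t\v\\"\''
--
--
-- def _hexval(ch):
--     o = ord(ch)
--     if 48 <= o <= 57:
--         return o - 48
--     if 97 <= o <= 102:
--         return o - 87
--     if 65 <= o <= 70:
--         return o - 55
--     return -1
--
--
-- def _process_escape_sequence(format_str: str, start: int) -> tuple:
--     """Process escape sequence starting at backslash. Returns (char, chars_consumed)."""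
--     if start + 1 >= len(format_str):
--         return '\\', 1
--
--     c = format_str[start + 1]
--
--     # Simple escapes via two parallel strings instead of a dict.
--     i = _KEYS.find(c)
--     if i >= 0:
--         return _VALS[i], 2
--
--     # Octal escape \nnn: accumulate up to three decimal digits arithmetically;
--     # a digit 8/9 or a value above 255 means "not an octal escape".
--     if '0' <= c <= '9':
--         value, ok, k, pos = 0, True, 0, start + 1
--         while pos < len(format_str) and k < 3 and '0' <= format_str[pos] <= '9':
--             d = ord(format_str[pos]) - 48
--             ok = ok and d < 8
--             value = value * 8 + d
--             pos += 1
--             k += 1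
--         if ok and value <= 255:
--             return chr(value), k + 1
--
--     # Hex escapes \xhh, \uhhhh, \Uhhhhhhhh: one char-at-a-time scan with a
--     # running value; stop on the first non-hex character.
--     n = 2 if c == 'x' else 4 if c == 'u' else 8 if c == 'U' else 0
--     if n and start + 2 + n <= len(format_str):
--         value, pos = 0, start + 2
--         while pos < start + 2 + n:
--             d = _hexval(format_str[pos])
--             if d < 0:
--                 break
--             value = value * 16 + d
--             pos += 1
--         if pos == start + 2 + n and value <= 0x10FFFF:
--             return chr(value), n + 2
--
--     return c, 2
-- ===== Notes on version B (the rewrite author's own statement) =====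
-- stated objective: alternative
-- what changed: B decodes arithmetically character by character with running accumulators (value = value*base + digit) instead of A's slice-then-parse pipeline: the escape dict becomes two parallel strings indexed via str.find, the octal branch folds digits into an int with an ok-flag instead of building a string for int(.,8) under try/except, and the three hex branches become one fixed-length scan that multiplies-and-adds hex digit values and bails on the first non-hex character, with no slicing, no int(), no try/except anywhere.
-- outside the precondition, e.g. on _process_escape_sequence('x41', -4): A returns ('x', 2), B returns ('A', 4)
import Mathlib
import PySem

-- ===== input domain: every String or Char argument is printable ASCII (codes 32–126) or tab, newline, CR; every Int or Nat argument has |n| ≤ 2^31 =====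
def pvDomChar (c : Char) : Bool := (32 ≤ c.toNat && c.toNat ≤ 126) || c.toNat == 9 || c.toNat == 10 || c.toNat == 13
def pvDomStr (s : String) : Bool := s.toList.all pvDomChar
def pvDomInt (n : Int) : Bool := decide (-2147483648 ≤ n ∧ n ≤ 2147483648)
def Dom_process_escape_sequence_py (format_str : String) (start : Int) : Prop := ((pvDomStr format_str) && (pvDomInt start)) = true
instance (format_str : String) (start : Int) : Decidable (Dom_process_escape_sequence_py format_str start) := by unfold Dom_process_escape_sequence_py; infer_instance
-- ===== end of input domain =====

-- B decodes arithmetically character by character (running value = value*base + digit, two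
-- parallel key/value strings instead of a dict, no slices, no int(), no try/except);
-- objective: alternative.

-- Python str.isdigit for one character; exact on the ASCII domain (Dom)
def pvIsDigit (c : Char) : Bool := decide ('0' ≤ c) && decide (c ≤ '9')

-- the charset '0123456789abcdefABCDEF' A tests hex digits against
def pvHexDigits : List Char :=
  ['0','1','2','3','4','5','6','7','8','9','a','b','c','d','e','f','A','B','C','D','E','F']

-- hand port of int(s, base): positional left fold, none = ValueError on a bad digit or an
-- empty string. Exact at A's call sites: the argument is always a run of isdigit-checked
-- (octal) or hex-charset-checked (hex) characters, so no sign, whitespace, underscore or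
-- 0x-prefix can occur there and ValueError is exactly "some digit not valid for the base".
def pvDigitVal? (b : Int) (c : Char) : Option Int :=
  let v : Int :=
    if '0' ≤ c ∧ c ≤ '9' then (c.toNat : Int) - 48
    else if 'a' ≤ c ∧ c ≤ 'z' then (c.toNat : Int) - 87
    else if 'A' ≤ c ∧ c ≤ 'Z' then (c.toNat : Int) - 55
    else -1
  if 0 ≤ v ∧ v < b then some v else none

def pvIntBase? (cs : List Char) (b : Int) : Option Int :=
  if cs = [] then none
  else cs.foldl (fun acc c => acc.bind fun v => (pvDigitVal? b c).map fun d => v * b + d) (some 0)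

-- chr(v) for a hex/octal-parsed v (never negative): ValueError above 0x10FFFF → none.
-- Surrogate code points (excluded by Pre_) are not representable as a Lean Char.
def pvChrHex? (v : Int) : Option Char :=
  if v ≤ 0x10FFFF then some (Char.ofNat v.toNat) else none

-- ===== PORT A =====
def pvEscapeMapA : List (Char × String) :=
  [('a', "\x07"), ('b', "\x08"), ('f', "\x0C"), ('n', "\n"), ('r', "\x0D"),
   ('t', "\t"), ('v', "\x0B"), ('\\', "\\"), ('"', "\""), ('\'', "'")]

-- the while-loop collecting octal_str: returns (octal_str, final i)
def pvOctLoopA (s : List Char) (stop i : Int) : List Char × Int :=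
  if h : i < (s.length : Int) ∧ i < stop then
    if pvIsDigit ((PySem.List.pyGet? s i).getD '\x00') then
      let r := pvOctLoopA s stop (i + 1)
      (((PySem.List.pyGet? s i).getD '\x00') :: r.1, r.2)
    else ([], i)
  else ([], i)
  termination_by (stop - i).toNat
  decreasing_by omega

def process_escape_sequence_py (format_str : String) (start : Int) : String × Int :=
  let s := format_str.toList
  let len : Int := (s.length : Int)
  if start + 1 ≥ len then ("\\", 1)
  else
    -- format_str[start + 1]; IndexError (start + 1 < -len) is outside Pre_
    let next_char := (PySem.List.pyGet? s (start + 1)).getD '\x00'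
    match List.find? (fun p => p.1 == next_char) pvEscapeMapA with
    | some p => (p.2, 2)
    | none =>
      let octRes : Option (String × Int) :=
        if pvIsDigit next_char then
          let r := pvOctLoopA s (start + 4) (start + 1)
          -- int(octal_str, 8); none = ValueError → pass
          match pvIntBase? r.1 8 with
          | some value =>
              if value ≤ 255 then some (String.ofList [Char.ofNat value.toNat], r.2 - start) else none
          | none => none
        else none
      match octRes with
      | some out => out
      | none =>
        let xRes : Option (String × Int) :=
          if next_char = 'x' ∧ start + 3 < len then
            let hex_str := PySem.List.slice s (some (start + 2)) (some (start + 4))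
            if hex_str.all (fun ch => pvHexDigits.contains ch) then
              match pvIntBase? hex_str 16 with
              | some v => (pvChrHex? v).map (fun ch => (String.ofList [ch], (4 : Int)))
              | none => none
            else none
          else none
        match xRes with
        | some out => out
        | none =>
          let uRes : Option (String × Int) :=
            if next_char = 'u' ∧ start + 6 ≤ len then
              let hex_str := PySem.List.slice s (some (start + 2)) (some (start + 6))
              if hex_str.all (fun ch => pvHexDigits.contains ch) then
                match pvIntBase? hex_str 16 with
                | some v => (pvChrHex? v).map (fun ch => (String.ofList [ch], (6 : Int)))
                | none => none
              else none
            else none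
          match uRes with
          | some out => out
          | none =>
            let URes : Option (String × Int) :=
              if next_char = 'U' ∧ start + 10 ≤ len then
                let hex_str := PySem.List.slice s (some (start + 2)) (some (start + 10))
                if hex_str.all (fun ch => pvHexDigits.contains ch) then
                  match pvIntBase? hex_str 16 with
                  | some v => (pvChrHex? v).map (fun ch => (String.ofList [ch], (10 : Int)))
                  | none => none
                else none
              else none
            match URes with
            | some out => out
            | none => (String.ofList [next_char], 2)

-- ===== PORT B =====
def pvKeysB : List Char := ['a','b','f','n','r','t','v','\\','"','\'']
def pvValsB : List Char := ['\x07','\x08','\x0C','\n','\x0D','\t','\x0B','\\','"','\'']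

def pvHexValB (ch : Char) : Int :=
  let o : Int := (ch.toNat : Int)
  if 48 ≤ o ∧ o ≤ 57 then o - 48
  else if 97 ≤ o ∧ o ≤ 102 then o - 87
  else if 65 ≤ o ∧ o ≤ 70 then o - 55
  else -1

-- Source B's octal while-loop: state (value, ok, k), position pos
def pvOctLoopB (s : List Char) (value : Int) (ok : Bool) (k : Nat) (pos : Int) : Int × Bool × Nat :=
  if h : pos < (s.length : Int) ∧ k < 3 ∧
      (let ch := (PySem.List.pyGet? s pos).getD '\x00'; '0' ≤ ch ∧ ch ≤ '9') then
    let d : Int := (((PySem.List.pyGet? s pos).getD '\x00').toNat : Int) - 48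
    pvOctLoopB s (value * 8 + d) (ok && decide (d < 8)) (k + 1) (pos + 1)
  else (value, ok, k)
  termination_by 3 - k
  decreasing_by omega

-- Source B's hex while-loop with its break: returns (value, final pos)
def pvHexLoopB (s : List Char) (value : Int) (pos stop : Int) : Int × Int :=
  if h : pos < stop then
    let d := pvHexValB ((PySem.List.pyGet? s pos).getD '\x00')
    if d < 0 then (value, pos)
    else pvHexLoopB s (value * 16 + d) (pos + 1) stop
  else (value, pos)
  termination_by (stop - pos).toNat
  decreasing_by omega

def process_escape_sequence_py_alt (format_str : String) (start : Int) : String × Int :=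
  let s := format_str.toList
  let len : Int := (s.length : Int)
  if start + 1 ≥ len then ("\\", 1)
  else
    let c := (PySem.List.pyGet? s (start + 1)).getD '\x00'
    let i := PySem.Chars.find pvKeysB [c]
    if i ≥ 0 then (String.ofList [(PySem.List.pyGet? pvValsB i).getD '\x00'], 2)
    else
      let octRes : Option (String × Int) :=
        if '0' ≤ c ∧ c ≤ '9' then
          let r := pvOctLoopB s 0 true 0 (start + 1)
          if r.2.1 = true ∧ r.1 ≤ 255 then
            some (String.ofList [Char.ofNat r.1.toNat], (r.2.2 : Int) + 1)
          else none
        else none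
      match octRes with
      | some out => out
      | none =>
        let n : Int := if c = 'x' then 2 else if c = 'u' then 4 else if c = 'U' then 8 else 0
        if n ≠ 0 ∧ start + 2 + n ≤ len then
          let r := pvHexLoopB s 0 (start + 2) (start + 2 + n)
          if r.2 = start + 2 + n ∧ r.1 ≤ 0x10FFFF then
            (String.ofList [Char.ofNat r.1.toNat], n + 2)
          else (String.ofList [c], 2)
        else (String.ofList [c], 2)

-- ===== PRECONDITION & SPEC =====
-- true iff the input carries a \uhhhh or \Uhhhhhhhh escape denoting a surrogate code point
def pvSurr (format_str : String) (start : Int) : Bool :=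
  let s := format_str.toList
  let chk : Int → Bool := fun w =>
    let hex := PySem.List.slice s (some (start + 2)) (some (start + w))
    decide (start + w ≤ (s.length : Int)) && hex.all (fun ch => pvHexDigits.contains ch) &&
      (match pvIntBase? hex 16 with
       | some v => decide (0xD800 ≤ v ∧ v ≤ 0xDFFF)
       | none => false)
  match PySem.List.pyGet? s (start + 1) with
  | some 'u' => chk 6
  | some 'U' => chk 10
  | _ => false

-- Pre_ excludes negative start, which is outside the function's natural domain (start indexes
-- the backslash; A's values there arise from Python's negative-index wraparound and B's
-- wrap differently in the hex scan), and \u/\U escapes denoting surrogate code points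
-- U+D800–U+DFFF, which both Pythons return but which no Lean String can represent.
def Pre_process_escape_sequence_py (format_str : String) (start : Int) : Prop :=
  0 ≤ start ∧ pvSurr format_str start = false
instance (format_str : String) (start : Int) : Decidable (Pre_process_escape_sequence_py format_str start) := by
  unfold Pre_process_escape_sequence_py; infer_instance

def pvWitness_process_escape_sequence_py : String × Int := ("\\n", 0)

def Spec_process_escape_sequence_py (format_str : String) (start : Int) (out : String × Int) : Prop := out = process_escape_sequence_py_alt format_str start
instance (format_str : String) (start : Int) (out : String × Int) : Decidable (Spec_process_escape_sequence_py format_str start out) := by unfold Spec_process_escape_sequence_py; infer_instance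

-- ===== CLAIM (what is proved, stated in full; the proofs are below) =====
def Claim_equal_process_escape_sequence_py : Prop := ∀ (format_str : String) (start : Int), Dom_process_escape_sequence_py format_str start → Pre_process_escape_sequence_py format_str start → Spec_process_escape_sequence_py format_str start (process_escape_sequence_py format_str start)

-- ===== LEMMAS AND PROOFS =====

theorem pvSlice_eq (s : List Char) (i : Int) (m : Nat) (hi : 0 ≤ i) :
    PySem.List.slice s (some i) (some (i + (m : Int))) = (s.drop i.toNat).take m := by
  simp only [PySem.List.slice, PySem.List.clampIdx]
  have h1 : ¬ i < 0 := by omega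
  have h2 : ¬ i + (m:Int) < 0 := by omega
  simp only [if_neg h1, if_neg h2]
  have h3 : (i + (m:Int)).toNat = i.toNat + m := by omega
  rw [h3]
  by_cases h4 : i.toNat ≤ s.length
  · rw [min_eq_left h4]
    rw [List.take_eq_take_min, List.take_eq_take_min (i := m)]
    congr 1
    simp [List.length_drop]
    omega
  · have hmin : min i.toNat s.length = s.length := min_eq_right (by omega)
    rw [hmin, List.drop_length, List.drop_of_length_le (show s.length ≤ i.toNat by omega)]
    simp

theorem pvOctLoopA_eq (m : Nat) : ∀ (s : List Char) (a : Nat),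
    pvOctLoopA s ((a : Int) + (m : Int)) (a : Int) =
      (((s.drop a).take m).takeWhile pvIsDigit,
        (a : Int) + ((((s.drop a).take m).takeWhile pvIsDigit).length : Int)) := by
  induction m with
  | zero =>
    intro s a
    rw [pvOctLoopA]
    simp
  | succ m ih =>
    intro s a
    rw [pvOctLoopA]
    by_cases ha : a < s.length
    · have hcond : (a : Int) < (s.length : Int) ∧ (a : Int) < (a : Int) + ((m + 1 : Nat) : Int) := by
        exact ⟨by exact_mod_cast ha, by push_cast; omega⟩
      rw [dif_pos hcond]
      have hget : PySem.List.pyGet? s (a : Int) = s[a]? := PySem.List.pyGet?_natCast s a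
      have hgetd : (PySem.List.pyGet? s (a : Int)).getD '\x00' = s[a] := by
        rw [hget, List.getElem?_eq_getElem ha]; rfl
      have hdrop : s.drop a = s[a] :: s.drop (a + 1) := List.drop_eq_getElem_cons ha
      have htake : (s.drop a).take (m + 1) = s[a] :: (s.drop (a + 1)).take m := by
        rw [hdrop]; rfl
      rw [hgetd, htake]
      by_cases hd : pvIsDigit s[a]
      · rw [if_pos hd]
        have harg : (a : Int) + ((m + 1 : Nat) : Int) = ((a + 1 : Nat) : Int) + (m : Int) := by
          push_cast; omega
        have harg2 : (a : Int) + 1 = ((a + 1 : Nat) : Int) := by push_cast; omega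
        rw [harg, harg2, ih s (a + 1)]
        simp [List.takeWhile, hd]
        omega
      · rw [if_neg hd]
        simp [List.takeWhile, hd]
    · have hcond : ¬((a : Int) < (s.length : Int) ∧ (a : Int) < (a : Int) + ((m + 1 : Nat) : Int)) := by
        push_cast; omega
      rw [dif_neg hcond]
      rw [List.drop_of_length_le (by omega)]
      simp


theorem pvDigitChar (c : Char) (h : pvIsDigit c = true) :
    c = '0' ∨ c = '1' ∨ c = '2' ∨ c = '3' ∨ c = '4' ∨ c = '5' ∨ c = '6' ∨ c = '7' ∨ c = '8' ∨ c = '9' := by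
  simp only [pvIsDigit, Bool.and_eq_true, decide_eq_true_eq] at h
  obtain ⟨h1, h2⟩ := h
  have hv1 : 48 ≤ c.toNat := h1
  have hv2 : c.toNat ≤ 57 := h2
  have hofn : Char.ofNat c.toNat = c := Char.ofNat_toNat c
  interval_cases hcn : c.toNat <;> rw [← hofn] <;> decide

theorem pvHexMem (c : Char) : c ∈ pvHexDigits ↔ 0 ≤ pvHexValB c := by
  constructor
  · intro h; fin_cases h <;> decide
  · intro h
    have hofn : Char.ofNat c.toNat = c := Char.ofNat_toNat c
    simp only [pvHexValB] at h
    split_ifs at h with h1 h2 h3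
    · have hv1 : 48 ≤ c.toNat := by omega
      have hv2 : c.toNat ≤ 57 := by omega
      interval_cases hcn : c.toNat <;> rw [← hofn] <;> decide
    · have hv1 : 97 ≤ c.toNat := by omega
      have hv2 : c.toNat ≤ 102 := by omega
      interval_cases hcn : c.toNat <;> rw [← hofn] <;> decide
    · have hv1 : 65 ≤ c.toNat := by omega
      have hv2 : c.toNat ≤ 70 := by omega
      interval_cases hcn : c.toNat <;> rw [← hofn] <;> decide
    · omega

theorem pvDigitVal16 (c : Char) (h : c ∈ pvHexDigits) :
    pvDigitVal? 16 c = some (pvHexValB c) := by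
  fin_cases h <;> decide

theorem pvOctVal (c : Char) (h : pvIsDigit c = true) :
    pvDigitVal? 8 c =
      if ((c.toNat : Int) - 48) < 8 then some ((c.toNat : Int) - 48) else none := by
  rcases pvDigitChar c h with rfl|rfl|rfl|rfl|rfl|rfl|rfl|rfl|rfl|rfl <;> decide

theorem pvFoldNone (b : Int) (dl : List Char) :
    dl.foldl (fun acc c => acc.bind fun w => (pvDigitVal? b c).map fun d => w * b + d) none = none := by
  induction dl with
  | nil => rfl
  | cons c r ih => simpa using ih

theorem pvParseOct (dl : List Char) : ∀ (v : Int), (∀ c ∈ dl, pvIsDigit c = true) →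
    dl.foldl (fun acc c => acc.bind fun w => (pvDigitVal? 8 c).map fun d => w * 8 + d) (some v) =
      if dl.all (fun c => decide (((c.toNat : Int) - 48) < 8)) then
        some (dl.foldl (fun x c => x * 8 + ((c.toNat : Int) - 48)) v)
      else none := by
  induction dl with
  | nil => intro v _; rfl
  | cons c r ih =>
    intro v hall
    have hc := hall c (by simp)
    have hr : ∀ x ∈ r, pvIsDigit x = true := fun x hx => hall x (by simp [hx])
    simp only [List.foldl_cons, List.all_cons]
    rw [pvOctVal c hc]
    by_cases hlt : ((c.toNat : Int) - 48) < 8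
    · rw [if_pos hlt]
      simp only [Option.bind_some, Option.map_some]
      rw [ih (v * 8 + ((c.toNat : Int) - 48)) hr]
      simp [hlt]
    · rw [if_neg hlt]
      have hnone : ((some v).bind fun w => Option.map (fun d => w * 8 + d) none) = none := rfl
      rw [hnone, pvFoldNone]
      simp [hlt]

theorem pvParseHex (hl : List Char) : ∀ (v : Int), (∀ c ∈ hl, c ∈ pvHexDigits) →
    hl.foldl (fun acc c => acc.bind fun w => (pvDigitVal? 16 c).map fun d => w * 16 + d) (some v) =
      some (hl.foldl (fun x c => x * 16 + pvHexValB c) v) := by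
  induction hl with
  | nil => intro v _; rfl
  | cons c r ih =>
    intro v hall
    simp only [List.foldl_cons]
    rw [pvDigitVal16 c (hall c (by simp))]
    simpa using ih (v * 16 + pvHexValB c) (fun x hx => hall x (by simp [hx]))

theorem pvFoldlAnd (q : Char → Bool) (dl : List Char) : ∀ (ok : Bool),
    dl.foldl (fun o c => o && q c) ok = (ok && dl.all q) := by
  induction dl with
  | nil => intro ok; simp
  | cons c r ih => intro ok; simp [ih, Bool.and_assoc]

theorem pvTakeLen (s : List Char) (a m : Nat) (h : a + m ≤ s.length) :
    ((s.drop a).take m).length = m := by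
  simp [List.length_take, List.length_drop]; omega

theorem pvOctLoopB_eq (m : Nat) : ∀ (s : List Char) (a : Nat) (v : Int) (ok : Bool), m ≤ 3 →
    pvOctLoopB s v ok (3 - m) (a : Int) =
      ((((s.drop a).take m).takeWhile pvIsDigit).foldl
          (fun x c => x * 8 + ((c.toNat : Int) - 48)) v,
       (((s.drop a).take m).takeWhile pvIsDigit).foldl
          (fun o c => o && decide (((c.toNat : Int) - 48) < 8)) ok,
       (3 - m) + (((s.drop a).take m).takeWhile pvIsDigit).length) := by
  induction m with
  | zero =>
    intro s a v ok _
    rw [pvOctLoopB]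
    simp
  | succ m ih =>
    intro s a v ok hm
    rw [pvOctLoopB]
    by_cases ha : a < s.length
    · have hget : (PySem.List.pyGet? s (a : Int)).getD '\x00' = s[a] := by
        rw [PySem.List.pyGet?_natCast s a, List.getElem?_eq_getElem ha]; rfl
      have hdrop : s.drop a = s[a] :: s.drop (a + 1) := List.drop_eq_getElem_cons ha
      have htake : (s.drop a).take (m + 1) = s[a] :: (s.drop (a + 1)).take m := by
        rw [hdrop]; rfl
      rw [htake]
      by_cases hd : pvIsDigit s[a]
      · have hd' : '0' ≤ s[a] ∧ s[a] ≤ '9' := by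
          simp only [pvIsDigit, Bool.and_eq_true, decide_eq_true_eq] at hd; exact hd
      
        have hcond : (a : Int) < (s.length : Int) ∧ 3 - (m + 1) < 3 ∧
            (let ch := (PySem.List.pyGet? s (a : Int)).getD '\x00'; '0' ≤ ch ∧ ch ≤ '9') := by
          refine ⟨by exact_mod_cast ha, by omega, ?_⟩
          rw [hget]; exact hd'
        rw [dif_pos hcond]
        have hk : 3 - (m + 1) + 1 = 3 - m := by omega
        have harg2 : (a : Int) + 1 = ((a + 1 : Nat) : Int) := by push_cast; omega
        rw [hget, hk, harg2, ih s (a + 1) _ _ (by omega)]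
        simp [hd, Prod.mk.injEq]
        omega
      · have hcond : ¬((a : Int) < (s.length : Int) ∧ 3 - (m + 1) < 3 ∧
            (let ch := (PySem.List.pyGet? s (a : Int)).getD '\x00'; '0' ≤ ch ∧ ch ≤ '9')) := by
          intro hcon
          apply hd
          have := hcon.2.2
          rw [hget] at this
          simp only [pvIsDigit, Bool.and_eq_true, decide_eq_true_eq]
          exact this
        rw [dif_neg hcond]
        simp only [List.takeWhile_cons, hd]
        simp
    · have hcond : ¬((a : Int) < (s.length : Int) ∧ 3 - (m + 1) < 3 ∧
          (let ch := (PySem.List.pyGet? s (a : Int)).getD '\x00'; '0' ≤ ch ∧ ch ≤ '9')) := by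
        intro hcon
        have : a < s.length := by exact_mod_cast hcon.1
        omega
      rw [dif_neg hcond]
      rw [List.drop_of_length_le (by omega)]
      simp

theorem pvHexLoopB_eq (m : Nat) : ∀ (s : List Char) (a : Nat) (v : Int), a + m ≤ s.length →
    pvHexLoopB s v (a : Int) ((a : Int) + (m : Int)) =
      ((((s.drop a).take m).takeWhile (fun c => decide (0 ≤ pvHexValB c))).foldl
          (fun x c => x * 16 + pvHexValB c) v,
       (a : Int) + ((((s.drop a).take m).takeWhile (fun c => decide (0 ≤ pvHexValB c))).length : Int)) := by
  induction m with
  | zero =>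
    intro s a v _
    rw [pvHexLoopB]
    simp
  | succ m ih =>
    intro s a v hb
    rw [pvHexLoopB]
    have ha : a < s.length := by omega
    have hcond : (a : Int) < (a : Int) + ((m + 1 : Nat) : Int) := by push_cast; omega
    rw [dif_pos hcond]
    have hget : (PySem.List.pyGet? s (a : Int)).getD '\x00' = s[a] := by
      rw [PySem.List.pyGet?_natCast s a, List.getElem?_eq_getElem ha]; rfl
    have hdrop : s.drop a = s[a] :: s.drop (a + 1) := List.drop_eq_getElem_cons ha
    have htake : (s.drop a).take (m + 1) = s[a] :: (s.drop (a + 1)).take m := by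
      rw [hdrop]; rfl
    rw [hget, htake]
    by_cases hd : pvHexValB s[a] < 0
    · rw [if_pos hd]
      have hp : (decide (0 ≤ pvHexValB s[a])) = false := by simpa using hd
      simp only [List.takeWhile_cons, hp]
      simp
    · rw [if_neg hd]
      have hp : (decide (0 ≤ pvHexValB s[a])) = true := by simpa using hd
      have harg2 : (a : Int) + 1 = ((a + 1 : Nat) : Int) := by push_cast; omega
      have harg3 : (a : Int) + ((m + 1 : Nat) : Int) = ((a + 1 : Nat) : Int) + (m : Int) := by
        push_cast; omega
      rw [harg3, harg2, ih s (a + 1) _ (by omega)]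
      simp [hp, Prod.mk.injEq]
      omega

-- the \x/\u/\U branch of A equals B's fixed-length scan, for hex-digit count m at a valid bound
theorem pvHexBranch (s : List Char) (start : Int) (t : Int) (hs : 0 ≤ start) (m : Nat) (hm : 0 < m)
    (hb : start + 2 + (m : Int) ≤ (s.length : Int)) :
    (if (PySem.List.slice s (some (start + 2)) (some (start + 2 + (m : Int)))).all
          (fun ch => pvHexDigits.contains ch) then
        match pvIntBase? (PySem.List.slice s (some (start + 2)) (some (start + 2 + (m : Int)))) 16 with
        | some v => (pvChrHex? v).map (fun ch => (String.ofList [ch], t))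
        | none => none
      else none) =
      (if (pvHexLoopB s 0 (start + 2) (start + 2 + (m : Int))).2 = start + 2 + (m : Int) ∧
          (pvHexLoopB s 0 (start + 2) (start + 2 + (m : Int))).1 ≤ 0x10FFFF then
        some (String.ofList [Char.ofNat (pvHexLoopB s 0 (start + 2) (start + 2 + (m : Int))).1.toNat], t)
      else none) := by
  obtain ⟨a, ha⟩ : ∃ a : Nat, (start + 2 : Int) = (a : Int) := ⟨(start + 2).toNat, by omega⟩
  have ham : a + m ≤ s.length := by
    have := hb; rw [ha] at this; exact_mod_cast this
  have hsl : PySem.List.slice s (some (start + 2)) (some (start + 2 + (m : Int))) =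
      (s.drop a).take m := by
    rw [ha, pvSlice_eq s (a : Int) m (by omega)]; simp
  have hloop := pvHexLoopB_eq m s a 0 ham
  rw [ha] at hsl
  rw [ha, hsl, hloop]
  set hl := (s.drop a).take m with hhl
  have hlen : hl.length = m := pvTakeLen s a m ham
  set pre := hl.takeWhile (fun c => decide (0 ≤ pvHexValB c)) with hpre
  by_cases hall : hl.all (fun ch => pvHexDigits.contains ch) = true
  · have hmem : ∀ c ∈ hl, c ∈ pvHexDigits := by
      intro c hc
      have := List.all_eq_true.mp hall c hc
      simpa using this
    have hfull : pre = hl := by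
      rw [hpre]
      apply List.takeWhile_eq_self_iff.mpr
      intro c hc
      simpa using (pvHexMem c).mp (hmem c hc)
    have hne : hl ≠ [] := by
      intro h; rw [h] at hlen; simp at hlen; omega
    have hparse : pvIntBase? hl 16 = some (hl.foldl (fun x c => x * 16 + pvHexValB c) 0) := by
      rw [pvIntBase?, if_neg hne]
      exact pvParseHex hl 0 hmem
    rw [if_pos hall, hparse, hfull, hlen]
    by_cases hv : hl.foldl (fun x c => x * 16 + pvHexValB c) 0 ≤ 0x10FFFF
    · rw [if_pos ⟨rfl, hv⟩]
      simp [pvChrHex?, hv]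
    · rw [if_neg (by intro hcon; exact hv hcon.2)]
      simp [pvChrHex?, hv]
  · rw [if_neg hall]
    have hlt : pre.length < m := by
      have hle : pre.length ≤ hl.length := (List.takeWhile_prefix _).length_le
      rcases lt_or_eq_of_le hle with h | h
      · omega
      · exfalso
        have hfull : pre = hl := (List.takeWhile_prefix _).eq_of_length h
        apply hall
        apply List.all_eq_true.mpr
        intro c hc
        have hc2 : c ∈ List.takeWhile (fun x => decide (0 ≤ pvHexValB x)) hl := by
          rw [← hfull] at hc; exact hc
        have hp := List.mem_takeWhile_imp (l := hl) (p := fun x => decide (0 ≤ pvHexValB x)) hc2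
        have : 0 ≤ pvHexValB c := by simpa using hp
        simpa using (pvHexMem c).mpr this
    rw [if_neg (by intro hcon; have := hcon.1; omega)]

-- ===== VERDICT (by name: the statement is the Claim_ definition above) =====
theorem process_escape_sequence_py_spec : Claim_equal_process_escape_sequence_py := by
  intro fs start hDom hPre
  obtain ⟨hs, -⟩ := hPre
  unfold Spec_process_escape_sequence_py
  simp only [process_escape_sequence_py, process_escape_sequence_py_alt]
  by_cases h1 : start + 1 ≥ ((fs.toList.length : Nat) : Int)
  · simp only [if_pos h1]
  · simp only [if_neg h1]
    set s := fs.toList with hsdef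
    generalize hc : (PySem.List.pyGet? s (start + 1)).getD '\x00' = c
    by_cases hk : c ∈ pvKeysB
    · fin_cases hk <;> rfl
    · have hkeys : ∀ x : Char, x ∈ pvKeysB → (x == c) = false := fun x hx =>
        beq_eq_false_iff_ne.mpr (fun h => hk (h ▸ hx))
      have hfA : List.find? (fun p => p.1 == c) pvEscapeMapA = none := by
        simp [pvEscapeMapA, List.find?,
          hkeys 'a' (by decide), hkeys 'b' (by decide), hkeys 'f' (by decide),
          hkeys 'n' (by decide), hkeys 'r' (by decide), hkeys 't' (by decide),
          hkeys 'v' (by decide), hkeys '\\' (by decide), hkeys '"' (by decide),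
          hkeys '\'' (by decide)]
      have hfB : PySem.Chars.find pvKeysB [c] = -1 :=
        (PySem.Chars.find_eq_neg_one_iff _ _).mpr (by rw [List.singleton_infix_iff]; exact hk)
      rw [hfA, hfB]
      rw [if_neg (by decide : ¬ ((-1 : Int) ≥ 0))]
      by_cases hd : pvIsDigit c = true
      · -- octal branch taken on both sides
        have hd' : '0' ≤ c ∧ c ≤ '9' := by
          simpa [pvIsDigit] using hd
        obtain ⟨a, ha⟩ : ∃ a : Nat, (start + 1 : Int) = (a : Int) := ⟨(start + 1).toNat, by omega⟩
        have ha4 : (start + 4 : Int) = (a : Int) + ((3 : Nat) : Int) := by omega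
        have haL : a < s.length := by
          have : (a : Int) < (s.length : Int) := by omega
          exact_mod_cast this
        have hca : s[a] = c := by
          rw [← hc, ha, PySem.List.pyGet?_natCast s a, List.getElem?_eq_getElem haL]; rfl
        have hB := pvOctLoopB_eq 3 s a 0 true (by norm_num)
        simp only [Nat.sub_self] at hB
        rw [ha, ha4, pvOctLoopA_eq 3 s a, hB]
        set dl := ((s.drop a).take 3).takeWhile pvIsDigit with hdl
        have htake : (s.drop a).take 3 = c :: (s.drop (a + 1)).take 2 := by
          rw [List.drop_eq_getElem_cons haL, hca]; rfl
        have hne : dl ≠ [] := by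
          rw [hdl, htake, List.takeWhile_cons, if_pos hd]
          exact List.cons_ne_nil _ _
        have hdigs : ∀ x ∈ dl, pvIsDigit x = true := by
          intro x hx
          exact List.mem_takeWhile_imp (l := (s.drop a).take 3) (p := pvIsDigit) hx
        have hparse : pvIntBase? dl 8 =
            if dl.all (fun x => decide (((x.toNat : Int) - 48) < 8)) then
              some (dl.foldl (fun x c => x * 8 + ((c.toNat : Int) - 48)) 0)
            else none := by
          rw [pvIntBase?, if_neg hne]
          exact pvParseOct dl 0 hdigs
        have hokB : dl.foldl (fun o c => o && decide (((c.toNat : Int) - 48) < 8)) true =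
            dl.all (fun x => decide (((x.toNat : Int) - 48) < 8)) := by
          rw [pvFoldlAnd]; simp
        -- default tail: a digit is none of 'x', 'u', 'U'
        have hcx : c ≠ 'x' := by
          rcases pvDigitChar c hd with rfl|rfl|rfl|rfl|rfl|rfl|rfl|rfl|rfl|rfl <;> decide
        have hcu : c ≠ 'u' := by
          rcases pvDigitChar c hd with rfl|rfl|rfl|rfl|rfl|rfl|rfl|rfl|rfl|rfl <;> decide
        have hcU : c ≠ 'U' := by
          rcases pvDigitChar c hd with rfl|rfl|rfl|rfl|rfl|rfl|rfl|rfl|rfl|rfl <;> decide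
        rw [if_pos hd, if_pos hd', hparse, hokB]
        by_cases hall : dl.all (fun x => decide (((x.toNat : Int) - 48) < 8)) = true
        · rw [hall]
          by_cases h255 : dl.foldl (fun x c => x * 8 + ((c.toNat : Int) - 48)) 0 ≤ 255
          · simp [h255, Prod.ext_iff]
            omega
          · simp [h255, hcx, hcu, hcU]
        · have hf : dl.all (fun x => decide (((x.toNat : Int) - 48) < 8)) = false := by
            revert hall; cases dl.all (fun x => decide (((x.toNat : Int) - 48) < 8)) <;> simp
          rw [hf]
          simp [hcx, hcu, hcU]
      · -- no octal: A skips (isdigit false), B skips the same test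
        have hnd : ¬ ('0' ≤ c ∧ c ≤ '9') := by
          intro h; exact hd (by simpa [pvIsDigit] using h)
        rw [if_neg hd, if_neg hnd]
        by_cases hcx : c = 'x'
        · subst hcx
          by_cases hb : start + 3 < ((s.length : Nat) : Int)
          · have hb' : start + 2 + ((2 : Nat) : Int) ≤ (s.length : Int) := by push_cast; omega
            have hEq := pvHexBranch s start 4 hs 2 (by norm_num) hb'
            have h24 : start + 2 + ((2 : Nat) : Int) = start + 4 := by push_cast; ring
            rw [h24] at hEq
            rw [if_pos (⟨rfl, hb⟩ : ('x' : Char) = 'x' ∧ start + 3 < ((s.length : Nat) : Int))]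
            have hbi : ((2 : Int) ≠ 0) ∧ start + 2 + 2 ≤ ((s.length : Nat) : Int) := by
              constructor
              · norm_num
              · omega
            have hst : start + 2 + (2 : Int) = start + 4 := by ring
            have hb4 : start + 4 ≤ ((s.length : Nat) : Int) := by omega
            by_cases hg : (pvHexLoopB s 0 (start + 2) (start + 4)).2 = start + 4 ∧
                (pvHexLoopB s 0 (start + 2) (start + 4)).1 ≤ 0x10FFFF
            · rw [if_pos hg] at hEq
              rw [hEq]
              simp [hst, hbi, hb4, hg]
            · rw [if_neg hg] at hEq
              rw [hEq]
              simp [hst, hbi, hb4, hg]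
          · have hnb : ¬ (start + 2 + (2 : Int) ≤ ((s.length : Nat) : Int)) := by omega
            simp [hb, hnb]
        · by_cases hcu : c = 'u'
          · subst hcu
            by_cases hb : start + 6 ≤ ((s.length : Nat) : Int)
            · have hb' : start + 2 + ((4 : Nat) : Int) ≤ (s.length : Int) := by push_cast; omega
              have hEq := pvHexBranch s start 6 hs 4 (by norm_num) hb'
              have h24 : start + 2 + ((4 : Nat) : Int) = start + 6 := by push_cast; ring
              rw [h24] at hEq
              rw [if_pos (⟨rfl, hb⟩ : ('u' : Char) = 'u' ∧ start + 6 ≤ ((s.length : Nat) : Int))]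
              have hbi : ((4 : Int) ≠ 0) ∧ start + 2 + 4 ≤ ((s.length : Nat) : Int) := by
                constructor
                · norm_num
                · omega
              have hst : start + 2 + (4 : Int) = start + 6 := by ring
              by_cases hg : (pvHexLoopB s 0 (start + 2) (start + 6)).2 = start + 6 ∧
                  (pvHexLoopB s 0 (start + 2) (start + 6)).1 ≤ 0x10FFFF
              · rw [if_pos hg] at hEq
                rw [hEq]
                simp [hst, hbi, hb, hg]
              · rw [if_neg hg] at hEq
                rw [hEq]
                simp [hst, hbi, hb, hg]
            · have hnb : ¬ (start + 2 + (4 : Int) ≤ ((s.length : Nat) : Int)) := by omega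
              simp [hb, hnb]
          · by_cases hcU : c = 'U'
            · subst hcU
              by_cases hb : start + 10 ≤ ((s.length : Nat) : Int)
              · have hb' : start + 2 + ((8 : Nat) : Int) ≤ (s.length : Int) := by push_cast; omega
                have hEq := pvHexBranch s start 10 hs 8 (by norm_num) hb'
                have h24 : start + 2 + ((8 : Nat) : Int) = start + 10 := by push_cast; ring
                rw [h24] at hEq
                rw [if_pos (⟨rfl, hb⟩ : ('U' : Char) = 'U' ∧ start + 10 ≤ ((s.length : Nat) : Int))]
                have hbi : ((8 : Int) ≠ 0) ∧ start + 2 + 8 ≤ ((s.length : Nat) : Int) := by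
                  constructor
                  · norm_num
                  · omega
                have hst : start + 2 + (8 : Int) = start + 10 := by ring
                by_cases hg : (pvHexLoopB s 0 (start + 2) (start + 10)).2 = start + 10 ∧
                    (pvHexLoopB s 0 (start + 2) (start + 10)).1 ≤ 0x10FFFF
                · rw [if_pos hg] at hEq
                  rw [hEq]
                  simp [hst, hbi, hb, hg]
                · rw [if_neg hg] at hEq
                  rw [hEq]
                  simp [hst, hbi, hb, hg]
              · have hnb : ¬ (start + 2 + (8 : Int) ≤ ((s.length : Nat) : Int)) := by omega
                simp [hb, hnb]
            · -- plain character: both fall through to the default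
              simp [hcx, hcu, hcU]
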